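-- pv_equiv track=rewrite | github.com/dylanhogg/sqlexplore | src/sqlexplore/engine.py | _detect_sql_clause_from_words
-- ===== SOURCE A (Python) =====
-- from typing import Any, Callable, Literal, cast
--
-- SqlClause = Literal["unknown", "select", "from", "join", "where", "group_by", "having", "order_by", "limit", "join_on"]
--
-- def _detect_sql_clause_from_words(words: list[str]) -> SqlClause:
--     clause: SqlClause = "unknown"
--     for word in words:
--         token = " ".join(word.split())
--         if token == "SELECT":
--             clause = "select"
--         elif token == "FROM":
--             clause = "from"
--         elif token in {"WHERE", "HAVING", "LIMIT"}:
--             clause = cast(SqlClause, token.lower())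
--         elif token == "GROUP BY":
--             clause = "group_by"
--         elif token == "ORDER BY":
--             clause = "order_by"
--         elif token == "ON":
--             clause = "join_on"
--         elif token in {"JOIN", "LEFT JOIN", "RIGHT JOIN", "INNER JOIN", "FULL JOIN", "CROSS JOIN"}:
--             clause = "join"
--     return clause
-- ===== SOURCE B (Python) =====
-- _CLAUSE_MAP = {
--     "SELECT": "select", "FROM": "from",
--     "WHERE": "where", "HAVING": "having", "LIMIT": "limit",
--     "GROUP BY": "group_by", "ORDER BY": "order_by", "ON": "join_on",
--     "JOIN": "join", "LEFT JOIN": "join", "RIGHT JOIN": "join",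
--     "INNER JOIN": "join", "FULL JOIN": "join", "CROSS JOIN": "join",
-- }
--
-- def _detect_sql_clause_from_words(words):
--     for word in reversed(words):
--         clause = _CLAUSE_MAP.get(" ".join(word.split()))
--         if clause is not None:
--             return clause
--     return "unknown"
-- ===== Notes on version B (the rewrite author's own statement) =====
-- stated objective: simpler
-- what changed: Replaces the forward overwrite loop with an if/elif keyword ladder by a single keyword-to-clause dict and a reverse scan that returns at the first (i.e. last-in-order) recognized token.
import Mathlib
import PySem

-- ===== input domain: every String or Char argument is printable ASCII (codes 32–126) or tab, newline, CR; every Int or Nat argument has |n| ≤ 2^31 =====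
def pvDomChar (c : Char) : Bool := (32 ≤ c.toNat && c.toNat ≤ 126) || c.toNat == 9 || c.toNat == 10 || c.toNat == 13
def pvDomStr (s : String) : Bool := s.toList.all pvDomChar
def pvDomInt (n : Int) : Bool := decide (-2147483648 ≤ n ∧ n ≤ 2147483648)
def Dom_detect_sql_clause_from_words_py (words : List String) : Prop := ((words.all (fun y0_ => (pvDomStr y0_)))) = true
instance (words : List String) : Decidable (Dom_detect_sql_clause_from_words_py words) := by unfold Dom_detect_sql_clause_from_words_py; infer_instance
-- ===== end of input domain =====

-- B replaces A's forward overwrite loop over an if/elif keyword ladder by one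
-- keyword→clause dict and a reverse scan returning at the first recognized token (simpler).

-- ===== PORT A =====
def detect_sql_clause_from_words_py (words : List String) : String :=
  words.foldl (fun clause word =>
    let token := PySem.Str.join " " (PySem.Str.split₀ word)
    if token == "SELECT" then "select"
    else if token == "FROM" then "from"
    else if PySem.Set.contains (PySem.Set.ofList ["WHERE", "HAVING", "LIMIT"]) token then
      PySem.Str.lower token
    else if token == "GROUP BY" then "group_by"
    else if token == "ORDER BY" then "order_by"
    else if token == "ON" then "join_on"
    else if PySem.Set.contains
        (PySem.Set.ofList ["JOIN", "LEFT JOIN", "RIGHT JOIN", "INNER JOIN", "FULL JOIN", "CROSS JOIN"]) token then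
      "join"
    else clause) "unknown"

-- ===== PORT B =====
def pvClauseMap : PySem.Dict String String := PySem.Dict.ofList
  [("SELECT", "select"), ("FROM", "from"),
   ("WHERE", "where"), ("HAVING", "having"), ("LIMIT", "limit"),
   ("GROUP BY", "group_by"), ("ORDER BY", "order_by"), ("ON", "join_on"),
   ("JOIN", "join"), ("LEFT JOIN", "join"), ("RIGHT JOIN", "join"),
   ("INNER JOIN", "join"), ("FULL JOIN", "join"), ("CROSS JOIN", "join")]

def pvAltGo : List String → String
  | [] => "unknown"
  | w :: ws =>
    match pvClauseMap.get? (PySem.Str.join " " (PySem.Str.split₀ w)) with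
    | some c => c
    | none => pvAltGo ws

def detect_sql_clause_from_words_py_alt (words : List String) : String :=
  pvAltGo words.reverse

-- ===== PRECONDITION & SPEC =====
def Spec_detect_sql_clause_from_words_py (words : List String) (out : String) : Prop := out = detect_sql_clause_from_words_py_alt words
instance (words : List String) (out : String) : Decidable (Spec_detect_sql_clause_from_words_py words out) := by unfold Spec_detect_sql_clause_from_words_py; infer_instance

-- ===== CLAIM (what is proved, stated in full; the proofs are below) =====
def Claim_equal_detect_sql_clause_from_words_py : Prop := ∀ (words : List String), Dom_detect_sql_clause_from_words_py words → Spec_detect_sql_clause_from_words_py words (detect_sql_clause_from_words_py words)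

-- ===== LEMMAS AND PROOFS =====

-- the lookup B performs on each (normalized) word
def pvLook (w : String) : Option String :=
  pvClauseMap.get? (PySem.Str.join " " (PySem.Str.split₀ w))

-- A's loop body equals "dict lookup, keep the accumulator on a miss"
theorem pvStep_eq (c w : String) :
    (let token := PySem.Str.join " " (PySem.Str.split₀ w)
     if token == "SELECT" then "select"
     else if token == "FROM" then "from"
     else if PySem.Set.contains (PySem.Set.ofList ["WHERE", "HAVING", "LIMIT"]) token then
       PySem.Str.lower token
     else if token == "GROUP BY" then "group_by"
     else if token == "ORDER BY" then "order_by"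
     else if token == "ON" then "join_on"
     else if PySem.Set.contains
         (PySem.Set.ofList ["JOIN", "LEFT JOIN", "RIGHT JOIN", "INNER JOIN", "FULL JOIN", "CROSS JOIN"]) token then
       "join"
     else c) = (pvLook w).getD c := by
  simp only [pvLook]
  generalize PySem.Str.join " " (PySem.Str.split₀ w) = t
  split_ifs with h1 h2 h3 h4 h5 h6 h7
  · have : t = "SELECT" := by simpa using h1
    subst this; rfl
  · have : t = "FROM" := by simpa using h2
    subst this; rfl
  · have : t = "WHERE" ∨ t = "HAVING" ∨ t = "LIMIT" := by
      simpa [PySem.Set.ofList, PySem.Set.contains, PySem.Set.add] using h3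
    rcases this with h | h | h <;> subst h <;> rfl
  · have : t = "GROUP BY" := by simpa using h4
    subst this; rfl
  · have : t = "ORDER BY" := by simpa using h5
    subst this; rfl
  · have : t = "ON" := by simpa using h6
    subst this; rfl
  · have : t = "JOIN" ∨ t = "LEFT JOIN" ∨ t = "RIGHT JOIN" ∨ t = "INNER JOIN" ∨ t = "FULL JOIN" ∨ t = "CROSS JOIN" := by
      simpa [PySem.Set.ofList, PySem.Set.contains, PySem.Set.add] using h7
    rcases this with h | h | h | h | h | h <;> subst h <;> rfl
  · have hm : pvClauseMap = PySem.Dict.mk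
        [("SELECT", "select"), ("FROM", "from"),
         ("WHERE", "where"), ("HAVING", "having"), ("LIMIT", "limit"),
         ("GROUP BY", "group_by"), ("ORDER BY", "order_by"), ("ON", "join_on"),
         ("JOIN", "join"), ("LEFT JOIN", "join"), ("RIGHT JOIN", "join"),
         ("INNER JOIN", "join"), ("FULL JOIN", "join"), ("CROSS JOIN", "join")] := by decide
    have hn : pvClauseMap.get? t = none := by
      rw [hm, PySem.Dict.get?_eq_none_iff_not_mem_keys]
      simp [PySem.Set.ofList, PySem.Set.contains, PySem.Set.add] at h1 h2 h3 h4 h5 h6 h7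
      simp_all
    simp [hn]

theorem pvAltGo_eq (l : List String) :
    pvAltGo l = (l.findSome? pvLook).getD "unknown" := by
  induction l with
  | nil => rfl
  | cons w ws ih =>
    simp only [pvAltGo, List.findSome?_cons, pvLook]
    cases pvClauseMap.get? (PySem.Str.join " " (PySem.Str.split₀ w)) <;> simp [ih]

-- ===== VERDICT (by name: the statement is the Claim_ definition above) =====
theorem pvFoldl_eq (l : List String) (c : String) :
    l.foldl (fun clause word =>
      let token := PySem.Str.join " " (PySem.Str.split₀ word)
      if token == "SELECT" then "select"
      else if token == "FROM" then "from"
      else if PySem.Set.contains (PySem.Set.ofList ["WHERE", "HAVING", "LIMIT"]) token then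
        PySem.Str.lower token
      else if token == "GROUP BY" then "group_by"
      else if token == "ORDER BY" then "order_by"
      else if token == "ON" then "join_on"
      else if PySem.Set.contains
          (PySem.Set.ofList ["JOIN", "LEFT JOIN", "RIGHT JOIN", "INNER JOIN", "FULL JOIN", "CROSS JOIN"]) token then
        "join"
      else clause) c = (l.reverse.findSome? pvLook).getD c := by
  induction l generalizing c with
  | nil => rfl
  | cons w ws ih =>
    rw [List.foldl_cons, ih, List.reverse_cons, List.findSome?_append]
    cases hws : ws.reverse.findSome? pvLook with
    | some v => simp
    | none =>
      simp only [Option.getD]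
      rw [pvStep_eq c w]
      cases h : pvLook w <;> simp [h, List.findSome?]

theorem detect_sql_clause_from_words_py_spec : Claim_equal_detect_sql_clause_from_words_py := by
  intro words _
  unfold Spec_detect_sql_clause_from_words_py detect_sql_clause_from_words_py detect_sql_clause_from_words_py_alt
  rw [pvFoldl_eq, pvAltGo_eq]
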